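-- pv_equiv track=rewrite | github.com/diem/off-chain-reference | src/offchainapi/status_logic.py | filter_for_cross_party_dependencies
-- ===== SOURCE A (Python) =====
-- def filter_for_cross_party_dependencies(jointlattice, dependencies):
--     ''' Ensure cross process status dependencies are respected '''
--     lattice = set(jointlattice)
--     for (post_state, pre_state) in dependencies:
--         for item in list(lattice):
--             ((s0, s1), (e0, e1)) = item
--             if e0 == post_state and s1 not in pre_state:
--                 lattice.remove(item)
--             elif e1 == post_state and s0 not in pre_state:
--                 lattice.remove(item)
--     return lattice
-- ===== SOURCE B (Python) =====
-- def filter_for_cross_party_dependencies(jointlattice, dependencies):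
--     ''' Ensure cross process status dependencies are respected '''
--     index = {}
--     for (post_state, pre_state) in dependencies:
--         index.setdefault(post_state, []).append(pre_state)
--     def ok(item):
--         ((s0, s1), (e0, e1)) = item
--         return all(s1 in pre for pre in index.get(e0, ())) and \
--                all(s0 in pre for pre in index.get(e1, ()))
--     return {item for item in jointlattice if ok(item)}
-- ===== Notes on version B (the rewrite author's own statement) =====
-- stated objective: alternative
-- what changed: A rescans the entire lattice set once per dependency and removes items in place; B builds a dict indexing pre-state lists by post-state in one pass over the dependencies and then keeps each lattice item with two bucket lookups in a single set comprehension, removing the per-dependency rescan (O(L+D+matches) vs O(D*L), though a timing run here could not confirm a wall-clock gain).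
import Mathlib
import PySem

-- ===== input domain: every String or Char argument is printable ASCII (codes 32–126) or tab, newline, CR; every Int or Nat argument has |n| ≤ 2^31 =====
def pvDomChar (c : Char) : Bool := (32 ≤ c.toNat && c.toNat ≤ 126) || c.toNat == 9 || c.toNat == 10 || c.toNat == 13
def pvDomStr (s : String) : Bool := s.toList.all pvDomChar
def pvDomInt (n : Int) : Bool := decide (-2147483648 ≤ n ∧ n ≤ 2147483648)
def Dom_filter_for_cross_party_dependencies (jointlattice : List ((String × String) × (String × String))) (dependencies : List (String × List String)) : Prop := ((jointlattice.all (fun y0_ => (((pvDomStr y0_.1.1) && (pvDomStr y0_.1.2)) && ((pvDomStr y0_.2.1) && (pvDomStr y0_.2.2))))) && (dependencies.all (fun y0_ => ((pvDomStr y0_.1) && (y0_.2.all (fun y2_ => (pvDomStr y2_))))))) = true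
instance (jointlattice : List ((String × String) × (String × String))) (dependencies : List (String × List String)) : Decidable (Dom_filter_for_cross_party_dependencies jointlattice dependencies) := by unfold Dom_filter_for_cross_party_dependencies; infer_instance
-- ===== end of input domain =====

-- B replaces A's per-dependency rescans of the whole set by a dict indexing the pre-state
-- lists by post-state, then keeps each lattice item after two bucket lookups (objective: alternative algorithm, removes the per-dependency rescan).
-- Equivalence is about the returned set (Python returns a set; the element order of the
-- PySem.Set list is the model's first-occurrence order on both sides).

-- ===== PORT A =====
-- `lattice.remove(item)` never raises here (the item comes from the snapshot and is removed
-- at most once per pass), so `(remove? …).getD cur` is exact on every reachable state.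
def filter_for_cross_party_dependencies (jointlattice : List ((String × String) × (String × String))) (dependencies : List (String × List String)) : List ((String × String) × (String × String)) :=
  List.foldl
    (fun lattice dep =>
      List.foldl
        (fun cur item =>
          if item.2.1 == dep.1 && !(dep.2.contains item.1.2) then
            (PySem.Set.remove? cur item).getD cur
          else if item.2.2 == dep.1 && !(dep.2.contains item.1.1) then
            (PySem.Set.remove? cur item).getD cur
          else cur)
        lattice lattice)
    (PySem.Set.ofList jointlattice) dependencies

-- ===== PORT B =====
def filter_for_cross_party_dependencies_alt (jointlattice : List ((String × String) × (String × String))) (dependencies : List (String × List String)) : List ((String × String) × (String × String)) :=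
  let index : PySem.Dict String (List (List String)) :=
    List.foldl (fun d dep => d.modify dep.1 [] (fun ls => ls ++ [dep.2])) (PySem.Dict.empty : PySem.Dict String (List (List String))) dependencies
  let ok : ((String × String) × (String × String)) → Bool := fun item =>
    ((index.getD item.2.1 []).all (fun pre => pre.contains item.1.2)) &&
    ((index.getD item.2.2 []).all (fun pre => pre.contains item.1.1))
  List.foldl (fun s item => if ok item then PySem.Set.add s item else s) PySem.Set.empty jointlattice

-- ===== PRECONDITION & SPEC =====
def Spec_filter_for_cross_party_dependencies (jointlattice : List ((String × String) × (String × String))) (dependencies : List (String × List String)) (out : List ((String × String) × (String × String))) : Prop := out = filter_for_cross_party_dependencies_alt jointlattice dependencies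
instance (jointlattice : List ((String × String) × (String × String))) (dependencies : List (String × List String)) (out : List ((String × String) × (String × String))) : Decidable (Spec_filter_for_cross_party_dependencies jointlattice dependencies out) := by unfold Spec_filter_for_cross_party_dependencies; infer_instance

-- ===== CLAIM (what is proved, stated in full; the proofs are below) =====
def Claim_equal_filter_for_cross_party_dependencies : Prop := ∀ (jointlattice : List ((String × String) × (String × String))) (dependencies : List (String × List String)), Dom_filter_for_cross_party_dependencies jointlattice dependencies → Spec_filter_for_cross_party_dependencies jointlattice dependencies (filter_for_cross_party_dependencies jointlattice dependencies)

-- ===== LEMMAS AND PROOFS =====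

-- the removal condition of one dependency pass of A (if ∨ elif)
def pvCond (dep : String × List String) (item : (String × String) × (String × String)) : Bool :=
  (item.2.1 == dep.1 && !(dep.2.contains item.1.2)) || (item.2.2 == dep.1 && !(dep.2.contains item.1.1))

-- B's index and keep-predicate, named for the proofs
def pvIdx (dependencies : List (String × List String)) : PySem.Dict String (List (List String)) :=
  List.foldl (fun d dep => d.modify dep.1 [] (fun ls => ls ++ [dep.2])) (PySem.Dict.empty : PySem.Dict String (List (List String))) dependencies

def pvOk (dependencies : List (String × List String)) (item : (String × String) × (String × String)) : Bool :=
  (((pvIdx dependencies).getD item.2.1 []).all (fun pre => pre.contains item.1.2)) &&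
  (((pvIdx dependencies).getD item.2.2 []).all (fun pre => pre.contains item.1.1))

-- total remove: `(remove? s x).getD s` is `filter (· != x)` in every case
lemma pv_del_eq {α : Type} [BEq α] [LawfulBEq α] (s : List α) (x : α) :
    (PySem.Set.remove? s x).getD s = s.filter (fun y => !(y == x)) := by
  unfold PySem.Set.remove? PySem.Set.discard
  by_cases h : PySem.Set.contains s x = true
  · rw [if_pos h, Option.getD_some]
  · rw [if_neg h, Option.getD_none]
    have hx : x ∉ s := fun hm => h ((PySem.Set.contains_iff s x).mpr hm)
    refine (List.filter_eq_self.mpr ?_).symm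
    intro y hy
    simp only [Bool.not_eq_eq_eq_not, Bool.not_true, beq_eq_false_iff_ne]
    exact fun he => hx (he ▸ hy)

lemma pv_step_eq (dep : String × List String) (cur : List ((String × String) × (String × String)))
    (item : (String × String) × (String × String)) :
    (if item.2.1 == dep.1 && !(dep.2.contains item.1.2) then
       (PySem.Set.remove? cur item).getD cur
     else if item.2.2 == dep.1 && !(dep.2.contains item.1.1) then
       (PySem.Set.remove? cur item).getD cur
     else cur)
    = if pvCond dep item then cur.filter (fun y => !(y == item)) else cur := by
  unfold pvCond
  rcases h1 : (item.2.1 == dep.1 && !(dep.2.contains item.1.2)) with _ | _ <;>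
  rcases h2 : (item.2.2 == dep.1 && !(dep.2.contains item.1.1)) with _ | _ <;>
  simp [pv_del_eq]

-- one inner pass, generalized over the accumulator
lemma pv_inner (dep : String × List String) :
    ∀ (l acc : List ((String × String) × (String × String))),
      List.foldl
        (fun cur item =>
          if item.2.1 == dep.1 && !(dep.2.contains item.1.2) then
            (PySem.Set.remove? cur item).getD cur
          else if item.2.2 == dep.1 && !(dep.2.contains item.1.1) then
            (PySem.Set.remove? cur item).getD cur
          else cur)
        acc l
      = acc.filter (fun x => !(l.contains x && pvCond dep x)) := by
  intro l
  induction l with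
  | nil => intro acc; simp
  | cons a t ih =>
    intro acc
    rw [List.foldl_cons, pv_step_eq]
    by_cases hc : pvCond dep a = true
    · rw [if_pos hc, ih, List.filter_filter]
      refine List.filter_congr ?_
      intro x _
      by_cases hx : x = a
      · subst hx; simp [hc]
      · simp [hx]
    · rw [if_neg hc, ih]
      refine List.filter_congr ?_
      intro x _
      by_cases hx : x = a
      · subst hx; simp [Bool.eq_false_iff.mp (by simpa using hc)]
      · simp [hx]

-- one pass over the snapshot itself filters by the condition
lemma pv_pass (dep : String × List String) (lat : List ((String × String) × (String × String))) :
    List.foldl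
      (fun cur item =>
        if item.2.1 == dep.1 && !(dep.2.contains item.1.2) then
          (PySem.Set.remove? cur item).getD cur
        else if item.2.2 == dep.1 && !(dep.2.contains item.1.1) then
          (PySem.Set.remove? cur item).getD cur
        else cur)
      lat lat
    = lat.filter (fun x => !(pvCond dep x)) := by
  rw [pv_inner]
  refine List.filter_congr ?_
  intro x hx
  simp [hx]

-- A's whole loop = one filter by the conjunction of all dependencies
lemma pv_A_eq : ∀ (deps : List (String × List String)) (acc : List ((String × String) × (String × String))),
    List.foldl
      (fun lattice dep =>
        List.foldl
          (fun cur item =>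
            if item.2.1 == dep.1 && !(dep.2.contains item.1.2) then
              (PySem.Set.remove? cur item).getD cur
            else if item.2.2 == dep.1 && !(dep.2.contains item.1.1) then
              (PySem.Set.remove? cur item).getD cur
            else cur)
          lattice lattice)
      acc deps
    = acc.filter (fun x => deps.all (fun dep => !(pvCond dep x))) := by
  intro deps
  induction deps with
  | nil => intro acc; simp
  | cons d t ih =>
    intro acc
    rw [List.foldl_cons, pv_pass, ih, List.filter_filter]
    refine List.filter_congr ?_
    intro x _
    simp [Bool.and_comm]

-- characterization of B's index buckets
lemma pv_idx_getD : ∀ (deps : List (String × List String)) (d : PySem.Dict String (List (List String))) (k : String),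
    (List.foldl (fun d dep => d.modify dep.1 [] (fun ls => ls ++ [dep.2])) d deps).getD k []
    = d.getD k [] ++ (deps.filter (fun q => q.1 == k)).map Prod.snd := by
  intro deps
  induction deps with
  | nil => intro d k; simp
  | cons q t ih =>
    intro d k
    rw [List.foldl_cons, ih]
    by_cases h : q.1 = k
    · subst h
      rw [PySem.Dict.getD_modify_self]
      simp
    · rw [PySem.Dict.getD_modify_of_ne _ _ _ (Ne.symm h)]
      simp [(beq_eq_false_iff_ne (a := q.1) (b := k)).mpr h]

-- B's keep-predicate = "no dependency removes the item"
lemma pv_beq_comm (a b : String) : (a == b) = (b == a) := by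
  by_cases h : a = b
  · simp [h]
  · simp [h, Ne.symm h]

lemma pv_all_and {α : Type} (l : List α) (p q : α → Bool) :
    (l.all p && l.all q) = l.all (fun x => p x && q x) := by
  induction l with
  | nil => rfl
  | cons a t ih =>
    rw [List.all_cons, List.all_cons, List.all_cons, ← ih]
    cases p a <;> cases q a <;> cases t.all p <;> cases t.all q <;> rfl

-- B's keep-predicate = "no dependency removes the item"
lemma pv_ok_eq (deps : List (String × List String)) (item : (String × String) × (String × String)) :
    pvOk deps item = deps.all (fun dep => !(pvCond dep item)) := by
  unfold pvOk pvIdx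
  rw [pv_idx_getD, pv_idx_getD]
  have he : ∀ (k : String), (PySem.Dict.empty : PySem.Dict String (List (List String))).getD k [] = [] :=
    fun _ => rfl
  rw [he, he, List.nil_append, List.nil_append, List.all_map, List.all_map,
    List.all_filter, List.all_filter, pv_all_and]
  refine List.all_congr rfl ?_
  intro dep
  simp only [Function.comp, pvCond, pv_beq_comm item.2.1 dep.1, pv_beq_comm item.2.2 dep.1]
  cases dep.1 == item.2.1 <;> cases dep.1 == item.2.2 <;>
    cases dep.2.contains item.1.2 <;> cases dep.2.contains item.1.1 <;> rfl

-- building a set from a filtered list = filtering the built set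
lemma pv_ofList_filter (p : ((String × String) × (String × String)) → Bool) :
    ∀ (l s0 : List ((String × String) × (String × String))),
      List.foldl PySem.Set.add (s0.filter p) (l.filter p) = (List.foldl PySem.Set.add s0 l).filter p := by
  intro l
  induction l with
  | nil => intro s0; simp
  | cons a t ih =>
    intro s0
    by_cases hp : p a = true
    · have hadd : (PySem.Set.add s0 a).filter p = PySem.Set.add (s0.filter p) a := by
        unfold PySem.Set.add
        by_cases hc : PySem.Set.contains s0 a = true
        · rw [if_pos hc, if_pos ((PySem.Set.contains_iff _ _).mpr
            (List.mem_filter.mpr ⟨(PySem.Set.contains_iff _ _).mp hc, hp⟩))]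
        · rw [if_neg hc, if_neg (fun hmem => hc ((PySem.Set.contains_iff _ _).mpr
            (List.mem_of_mem_filter ((PySem.Set.contains_iff _ _).mp hmem)))), List.filter_append]
          simp [hp]
      simp only [List.filter_cons, hp, if_pos, List.foldl_cons]
      rw [← hadd, ih (PySem.Set.add s0 a)]
    · have hadd : (PySem.Set.add s0 a).filter p = s0.filter p := by
        unfold PySem.Set.add
        by_cases hc : PySem.Set.contains s0 a = true
        · rw [if_pos hc]
        · rw [if_neg hc, List.filter_append]
          simp [hp]
      have hpf : p a ≠ true := hp
      simp only [List.filter_cons, hpf, if_neg, List.foldl_cons, Bool.false_eq_true, not_false_iff]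
      rw [← hadd, ih (PySem.Set.add s0 a)]

-- B = filter of the deduplicated lattice by pvOk
lemma pv_B_eq (jl : List ((String × String) × (String × String))) (deps : List (String × List String)) :
    filter_for_cross_party_dependencies_alt jl deps = (PySem.Set.ofList jl).filter (fun x => pvOk deps x) := by
  unfold filter_for_cross_party_dependencies_alt
  show List.foldl (fun s item => if pvOk deps item then PySem.Set.add s item else s) PySem.Set.empty jl = _
  rw [PySem.Set.ofList, ← pv_ofList_filter (fun x => pvOk deps x) jl PySem.Set.empty, List.foldl_filter]
  rfl

-- ===== VERDICT (by name: the statement is the Claim_ definition above) =====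
theorem filter_for_cross_party_dependencies_spec : Claim_equal_filter_for_cross_party_dependencies := by
  intro jl deps _
  show filter_for_cross_party_dependencies jl deps = filter_for_cross_party_dependencies_alt jl deps
  rw [pv_B_eq]
  unfold filter_for_cross_party_dependencies
  rw [pv_A_eq]
  exact List.filter_congr (fun x _ => (pv_ok_eq deps x).symm)
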